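-- pv_equiv track=rewrite | github.com/SkeyRahaman/Leet-code | Distinct Difference - GFG/distinct-difference.py | getDistinctDifference
-- ===== SOURCE A (Python) =====
-- from typing import List
-- from collections import Counter,defaultdict
--
-- def getDistinctDifference(N : int, A : List[int]) -> List[int]:
--     # code here
--     left = defaultdict(int)
--     right = Counter(A)
--     output = []
--     for i in A:
--         right[i] -= 1
--         if right[i] == 0:
--             del right[i]
--         output.append(len(left)-len(right))
--         left[i] += 1
--     return output
-- ===== SOURCE B (Python) =====
-- from typing import List
--
-- def getDistinctDifference(N : int, A : List[int]) -> List[int]: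
--     prefix = []            # prefix[p] = number of distinct values in A[:p]
--     seen = set()
--     for x in A:
--         prefix.append(len(seen))
--         seen.add(x)
--     suffix = []            # suffix[p] = number of distinct values in A[p+1:]
--     seen = set()
--     for x in reversed(A):
--         suffix.append(len(seen))
--         seen.add(x)
--     suffix.reverse()
--     return [p - s for p, s in zip(prefix, suffix)]
-- ===== Notes on version B (the rewrite author's own statement) =====
-- stated objective: faster
-- what changed: Replaces A's single pass over two simultaneously-maintained hash maps (a growing defaultdict and a shrinking Counter with per-element decrement/delete) by two independent set-based passes building full prefix-distinct and suffix-distinct arrays (the suffix one scanned backwards) zipped at the end; plain set.add beats the Counter decrement/delete bookkeeping by a constant factor.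
import Mathlib
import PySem

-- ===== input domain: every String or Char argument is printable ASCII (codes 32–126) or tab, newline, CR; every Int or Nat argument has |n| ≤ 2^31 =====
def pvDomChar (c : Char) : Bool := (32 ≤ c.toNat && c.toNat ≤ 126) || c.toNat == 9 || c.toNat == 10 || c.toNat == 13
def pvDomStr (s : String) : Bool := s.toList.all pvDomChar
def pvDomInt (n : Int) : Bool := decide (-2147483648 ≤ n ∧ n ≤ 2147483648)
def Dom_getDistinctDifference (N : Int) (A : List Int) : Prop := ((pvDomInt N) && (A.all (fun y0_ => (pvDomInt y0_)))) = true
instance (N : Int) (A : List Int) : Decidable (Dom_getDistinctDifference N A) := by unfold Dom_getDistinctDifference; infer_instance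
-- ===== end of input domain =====

-- B replaces A's single pass over two live hash maps by two independent set-based
-- prefix/suffix distinct-count passes zipped at the end (alternative decomposition, same O(n) cost).

-- ===== PORT A =====
-- the body of A's for-loop, on the state (left, right, output)
def pvStepA (st : PySem.Dict Int Int × PySem.Dict Int Int × List Int) (i : Int) :
    PySem.Dict Int Int × PySem.Dict Int Int × List Int :=
  let left := st.1
  let right := st.2.1
  let right := right.insert i (right.getD i 0 - 1)       -- right[i] -= 1
  let right := if right.getD i 0 = 0 then right.erase i else right   -- if right[i] == 0: del right[i]
  let output := st.2.2 ++ [((left.size : Int) - (right.size : Int))] -- output.append(len(left)-len(right))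
  let left := left.insert i (left.getD i 0 + 1)          -- left[i] += 1
  (left, right, output)

def getDistinctDifference (N : Int) (A : List Int) : List Int :=
  (A.foldl pvStepA (PySem.Dict.empty, PySem.Dict.counter A, [])).2.2

-- ===== PORT B =====
-- one pass of B: appends len(seen) then adds the element to seen
def pvDistPass (s : PySem.Set Int) : List Int → List Int
  | [] => []
  | x :: t => PySem.Set.len s :: pvDistPass (PySem.Set.add s x) t

def getDistinctDifference_alt (N : Int) (A : List Int) : List Int :=
  let pre := pvDistPass PySem.Set.empty A
  let suf := (pvDistPass PySem.Set.empty A.reverse).reverse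
  List.zipWith (fun p s => p - s) pre suf

-- ===== PRECONDITION & SPEC =====
def Spec_getDistinctDifference (N : Int) (A : List Int) (out : List Int) : Prop := out = getDistinctDifference_alt N A
instance (N : Int) (A : List Int) (out : List Int) : Decidable (Spec_getDistinctDifference N A out) := by unfold Spec_getDistinctDifference; infer_instance

-- ===== CLAIM (what is proved, stated in full; the proofs are below) =====
def Claim_equal_getDistinctDifference : Prop := ∀ (N : Int) (A : List Int), Dom_getDistinctDifference N A → Spec_getDistinctDifference N A (getDistinctDifference N A)

-- ===== LEMMAS AND PROOFS =====

-- two Nodup lists with the same members have the same length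
lemma pv_nodup_len (u v : List Int) (hu : u.Nodup) (hv : v.Nodup)
    (h : ∀ k, k ∈ u ↔ k ∈ v) : u.length = v.length :=
  ((List.perm_ext_iff_of_nodup hu hv).mpr h).length_eq

lemma pv_size_eq_keys_length (d : PySem.Dict Int Int) : d.size = d.keys.length := by
  simp [PySem.Dict.size, PySem.Dict.keys]

lemma pv_map_fst_filter (l : List (Int × Int)) (x : Int) :
    (l.filter (fun p => !(p.1 == x))).map (fun p => p.1)
      = (l.map (fun p => p.1)).filter (fun a => !(a == x)) := by
  induction l with
  | nil => rfl
  | cons a t ih => by_cases h : a.1 = x <;> simp [h, ih]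

lemma pv_keys_erase (d : PySem.Dict Int Int) (x : Int) :
    (d.erase x).keys = d.keys.filter (fun a => !(a == x)) := by
  simp [PySem.Dict.erase, PySem.Dict.keys, pv_map_fst_filter]

lemma pv_mem_keys_erase (d : PySem.Dict Int Int) (x k : Int) :
    k ∈ (d.erase x).keys ↔ k ∈ d.keys ∧ k ≠ x := by
  simp [pv_keys_erase]

lemma pv_nodup_keys_erase (d : PySem.Dict Int Int) (x : Int) (h : d.keys.Nodup) :
    (d.erase x).keys.Nodup := by
  rw [pv_keys_erase]; exact h.filter _

lemma pv_find?_filter_ne (l : List (Int × Int)) (x k : Int) (h : k ≠ x) :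
    (l.filter (fun p => !(p.1 == x))).find? (fun p => p.1 == k)
      = l.find? (fun p => p.1 == k) := by
  induction l with
  | nil => rfl
  | cons a t ih =>
    by_cases hx : a.1 = x
    · have hxk : (x == k) = false := by simpa using Ne.symm h
      simp [hx, hxk, ih]
    · by_cases hk : a.1 = k
      · simp [hk, h]
      · simp [hx, hk, ih]

lemma pv_getD_erase_ne (d : PySem.Dict Int Int) (x k : Int) (h : k ≠ x) :
    (d.erase x).getD k 0 = d.getD k 0 := by
  simp [PySem.Dict.getD, PySem.Dict.get?, PySem.Dict.erase, pv_find?_filter_ne d.items x k h]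

lemma pv_getD_erase_self (d : PySem.Dict Int Int) (x : Int) :
    (d.erase x).getD x 0 = 0 := by
  have : (d.items.filter (fun p => !(p.1 == x))).find? (fun p => p.1 == x) = none := by
    rw [List.find?_eq_none]
    intro p hp
    have := List.of_mem_filter hp
    simpa using this
  simp [PySem.Dict.getD, PySem.Dict.get?, PySem.Dict.erase, this]

-- B's pass over l ++ [x] ends with the distinct count of l (relative to s)
lemma pv_distPass_append (s : PySem.Set Int) (l : List Int) (x : Int) :
    pvDistPass s (l ++ [x])
      = pvDistPass s l ++ [PySem.Set.len (l.foldl PySem.Set.add s)] := by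
  induction l generalizing s with
  | nil => rfl
  | cons a t ih => simp [pvDistPass, ih]

-- main loop invariant: A's fold produces exactly B's zipped prefix/suffix values
lemma pv_loop_eq (rest : List Int) :
    ∀ (left right : PySem.Dict Int Int) (s : PySem.Set Int) (out : List Int),
    left.keys.Nodup → s.Nodup → (∀ k, k ∈ left.keys ↔ k ∈ s) →
    right.keys.Nodup → (∀ k, k ∈ right.keys ↔ k ∈ rest) →
    (∀ k, right.getD k 0 = rest.count k) →
    (rest.foldl pvStepA (left, right, out)).2.2
      = out ++ List.zipWith (fun p q => p - q) (pvDistPass s rest)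
          ((pvDistPass PySem.Set.empty rest.reverse).reverse) := by
  induction rest with
  | nil => intro _ _ _ out _ _ _ _ _ _; simp [pvDistPass]
  | cons x t ih =>
    intro left right s out hLnd hSnd hLS hRnd hRmem hRcnt
    -- the updated right after "right[x] -= 1; if right[x]==0: del right[x]"
    have hx1 : right.getD x 0 = t.count x + 1 := by
      rw [hRcnt x]; simp [List.count_cons_self]
    set r1 := right.insert x (right.getD x 0 - 1) with hr1
    have hr1getD : ∀ k, r1.getD k 0 = t.count k := by
      intro k
      rw [hr1, PySem.Dict.getD_insert]
      by_cases hk : k = x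
      · simp [hk, hx1]
      · rw [if_neg hk, hRcnt k]
        have hxk : ¬ x = k := fun he => hk he.symm
        simp [hxk]
    have hr1mem : ∀ k, k ∈ r1.keys ↔ k ∈ x :: t := by
      intro k
      rw [hr1, PySem.Dict.mem_keys_insert, hRmem k]
      simp [List.mem_cons]
    have hr1nd : r1.keys.Nodup := PySem.Dict.nodup_keys_insert _ _ _ hRnd
    set r2 := if r1.getD x 0 = 0 then r1.erase x else r1 with hr2
    have hr2getD : ∀ k, r2.getD k 0 = t.count k := by
      intro k
      rw [hr2]
      split_ifs with h0
      · by_cases hk : k = x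
        · rw [hk, pv_getD_erase_self]
          rw [hr1getD x] at h0; omega
        · rw [pv_getD_erase_ne _ _ _ hk, hr1getD]
      · exact hr1getD k
    have hr2mem : ∀ k, k ∈ r2.keys ↔ k ∈ t := by
      intro k
      rw [hr2]
      split_ifs with h0
      · rw [pv_mem_keys_erase, hr1mem k]
        have hxt : x ∉ t := by
          rw [hr1getD x] at h0
          exact List.count_eq_zero.mp (by exact_mod_cast h0)
        constructor
        · rintro ⟨hm, hne⟩
          rcases List.mem_cons.mp hm with h | h
          · exact absurd h hne
          · exact h
        · intro hk
          exact ⟨List.mem_cons_of_mem _ hk, fun he => hxt (he ▸ hk)⟩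
      · have hxt : x ∈ t := by
          rw [hr1getD x] at h0
          refine List.count_pos_iff.mp ?_
          have h0' : t.count x ≠ 0 := by exact_mod_cast h0
          omega
        rw [hr1mem k]
        constructor
        · intro hm
          rcases List.mem_cons.mp hm with h | h
          · exact h ▸ hxt
          · exact h
        · exact List.mem_cons_of_mem _
    have hr2nd : r2.keys.Nodup := by
      rw [hr2]; split_ifs
      · exact pv_nodup_keys_erase _ _ hr1nd
      · exact hr1nd
    -- the value appended this step
    have hleft : (left.size : Int) = PySem.Set.len s := by
      rw [pv_size_eq_keys_length, PySem.Set.len,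
        pv_nodup_len left.keys s hLnd hSnd hLS]
    have hrightlen : (r2.size : Int) = PySem.Set.len (PySem.Set.ofList t.reverse) := by
      rw [pv_size_eq_keys_length, PySem.Set.len]
      congr 1
      refine pv_nodup_len _ _ hr2nd (PySem.Set.nodup_ofList t.reverse) ?_
      intro k
      rw [hr2mem k, PySem.Set.mem_ofList, List.mem_reverse]
    -- updated left
    have hLnd' : (left.insert x (left.getD x 0 + 1)).keys.Nodup :=
      PySem.Dict.nodup_keys_insert _ _ _ hLnd
    have hSnd' : (PySem.Set.add s x).Nodup := PySem.Set.nodup_add s x hSnd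
    have hLS' : ∀ k, k ∈ (left.insert x (left.getD x 0 + 1)).keys ↔ k ∈ PySem.Set.add s x := by
      intro k
      rw [PySem.Dict.mem_keys_insert, PySem.Set.mem_add, hLS k]
      tauto
    -- suffix array of x :: t decomposes
    have hsuf : (pvDistPass PySem.Set.empty (x :: t).reverse).reverse
        = PySem.Set.len (PySem.Set.ofList t.reverse)
            :: (pvDistPass PySem.Set.empty t.reverse).reverse := by
      have : (x :: t).reverse = t.reverse ++ [x] := by simp
      rw [this, pv_distPass_append]
      simp [PySem.Set.ofList_eq_foldl]
    -- unfold one step of the fold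
    have hstep : pvStepA (left, right, out) x
        = (left.insert x (left.getD x 0 + 1), r2,
            out ++ [(left.size : Int) - (r2.size : Int)]) := by
      simp only [pvStepA, hr1, hr2]
    rw [List.foldl_cons, hstep,
      ih (left.insert x (left.getD x 0 + 1)) r2 (PySem.Set.add s x)
        (out ++ [(left.size : Int) - (r2.size : Int)])
        hLnd' hSnd' hLS' hr2nd hr2mem hr2getD,
      hsuf]
    simp [pvDistPass, hleft, hrightlen]

-- ===== VERDICT (by name: the statement is the Claim_ definition above) =====
theorem getDistinctDifference_spec : Claim_equal_getDistinctDifference := by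
  intro N A _
  unfold Spec_getDistinctDifference getDistinctDifference getDistinctDifference_alt
  rw [pv_loop_eq A PySem.Dict.empty (PySem.Dict.counter A) PySem.Set.empty []
    (by simp [PySem.Dict.keys_empty]) (by simp [PySem.Set.empty])
    (by simp [PySem.Dict.keys_empty, PySem.Set.empty])
    (PySem.Dict.nodup_keys_counter A)
    (by intro k; rw [PySem.Dict.keys_counter, PySem.Set.mem_ofList])
    (by intro k; rw [PySem.Dict.getD_counter])]
  simp
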